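-- pv_equiv track=rewrite | github.com/somethingreallycool123/CodeMate | codemate_ai/magics.py | _split_code_and_explanation
-- ===== SOURCE A (Python) =====
-- def _split_code_and_explanation(response):
--     """
--     Split the LLM response into code and explanation text.
--
--     Parameters:
--     - response (str): The response from the LLM.
--
--     Returns:
--     - tuple: (code, explanation)
--     """
--     lines = response.splitlines()
--     code_lines = []
--     explanation_lines = []
--     is_code_block = False
--
--     for line in lines:
--         # Detect code blocks (enclosed in triple backticks)
--         if line.strip().startswith("```"):
--             is_code_block = not is_code_block
--             continue
--
--         # Append to code or explanation based on current block
--         if is_code_block: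
--             code_lines.append(line)
--         else:
--             explanation_lines.append(line)
--
--     code = "\n".join(code_lines).strip()
--     explanation = "\n".join(explanation_lines).strip()
--     return code, explanation
-- ===== SOURCE B (Python) =====
-- def _alternate(segments):
--     """Partition alternating segments: even-positioned go to the first group,
--     odd-positioned to the second."""
--     first = []
--     second = []
--     take_first = True
--     for seg in segments:
--         if take_first:
--             first.extend(seg)
--         else:
--             second.extend(seg)
--         take_first = not take_first
--     return first, second
--
--
-- def _split_code_and_explanation(response):
--     """Split the LLM response into (code, explanation) by ``` fence lines:
--     first cut the lines into fence-delimited segments, then partition the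
--     segments by position (even = explanation, odd = code)."""
--     closed = []
--     cur = []
--     for line in response.splitlines():
--         if line.strip().startswith("```"):
--             closed.append(cur)
--             cur = []
--         else:
--             cur.append(line)
--     segments = closed + [cur]
--     explanation_lines, code_lines = _alternate(segments)
--     return "\n".join(code_lines).strip(), "\n".join(explanation_lines).strip()
-- ===== Notes on version B (the rewrite author's own statement) =====
-- stated objective: alternative
-- what changed: Replaced the running is_code_block toggle that routes each line into one of two accumulators by a two-phase decomposition: first cut the lines into fence-delimited segments, then partition the segments by position parity (even = explanation, odd = code).
import Mathlib
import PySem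

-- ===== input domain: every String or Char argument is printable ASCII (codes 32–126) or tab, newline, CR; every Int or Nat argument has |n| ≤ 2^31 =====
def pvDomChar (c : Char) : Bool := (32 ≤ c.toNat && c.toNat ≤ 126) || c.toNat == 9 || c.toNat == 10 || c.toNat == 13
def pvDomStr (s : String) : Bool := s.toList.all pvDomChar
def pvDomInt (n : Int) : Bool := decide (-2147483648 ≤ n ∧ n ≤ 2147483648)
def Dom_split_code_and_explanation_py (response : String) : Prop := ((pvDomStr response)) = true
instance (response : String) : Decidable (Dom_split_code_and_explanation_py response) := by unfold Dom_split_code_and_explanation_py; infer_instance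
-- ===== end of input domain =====

-- B replaces A's running toggle flag by a build-segments-then-partition-by-parity decomposition (same cost; objective: alternative).


-- shared transliteration of the fence test `line.strip().startswith("```")` (appears verbatim in both Pythons)
def pvIsFence (line : String) : Bool := PySem.Str.startswith (PySem.Str.strip line) "```"

-- ===== PORT A =====
-- loop body of A: a fence line toggles the flag, otherwise the line goes to code or explanation
def pvAStep (st : List String × List String × Bool) (line : String) : List String × List String × Bool :=
  if pvIsFence line then (st.1, st.2.1, !st.2.2)
  else if st.2.2 then (st.1 ++ [line], st.2.1, st.2.2)
  else (st.1, st.2.1 ++ [line], st.2.2)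

def split_code_and_explanation_py (response : String) : String × String :=
  let lines := PySem.Str.splitlines response
  let r := lines.foldl pvAStep ([], [], false)
  (PySem.Str.strip (PySem.Str.join "\n" r.1), PySem.Str.strip (PySem.Str.join "\n" r.2.1))

-- ===== PORT B =====
-- loop body of B's first phase: a fence line closes the current segment, otherwise extend it
def pvSegStep (st : List (List String) × List String) (line : String) : List (List String) × List String :=
  if pvIsFence line then (st.1 ++ [st.2], ([] : List String))
  else (st.1, st.2 ++ [line])

def pvSegments (lines : List String) : List (List String) :=
  let r := lines.foldl pvSegStep ([], [])
  r.1 ++ [r.2]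

-- loop body of B's _alternate: even-positioned segments to the first group, odd to the second
def pvAltStep (st : List String × List String × Bool) (seg : List String) : List String × List String × Bool :=
  if st.2.2 then (st.1 ++ seg, st.2.1, !st.2.2)
  else (st.1, st.2.1 ++ seg, !st.2.2)

def pvAlternate (segs : List (List String)) : List String × List String :=
  let r := segs.foldl pvAltStep ([], [], true)
  (r.1, r.2.1)

def split_code_and_explanation_py_alt (response : String) : String × String :=
  let segs := pvSegments (PySem.Str.splitlines response)
  let p := pvAlternate segs
  (PySem.Str.strip (PySem.Str.join "\n" p.2), PySem.Str.strip (PySem.Str.join "\n" p.1))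

-- ===== PRECONDITION & SPEC =====
def Spec_split_code_and_explanation_py (response : String) (out : String × String) : Prop := out = split_code_and_explanation_py_alt response
instance (response : String) (out : String × String) : Decidable (Spec_split_code_and_explanation_py response out) := by unfold Spec_split_code_and_explanation_py; infer_instance

-- ===== CLAIM (what is proved, stated in full; the proofs are below) =====
def Claim_equal_split_code_and_explanation_py : Prop := ∀ (response : String), Dom_split_code_and_explanation_py response → Spec_split_code_and_explanation_py response (split_code_and_explanation_py response)

-- ===== LEMMAS AND PROOFS =====

-- flatten of the segments picked when the alternating flag is true, flag starting at t
def pvPick (t : Bool) : List (List String) → List String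
  | [] => []
  | s :: ss => (if t then s else []) ++ pvPick (!t) ss

theorem pvAlt_fold (segs : List (List String)) : ∀ (f s : List String) (t : Bool),
    ((segs.foldl pvAltStep (f, s, t)).1, (segs.foldl pvAltStep (f, s, t)).2.1)
      = (f ++ pvPick t segs, s ++ pvPick (!t) segs) := by
  induction segs with
  | nil => intro f s t; simp [pvPick]
  | cons seg ss ih =>
    intro f s t
    cases t <;> simp [List.foldl, pvAltStep, pvPick, ih]

theorem pvPick_append (l r : List (List String)) : ∀ (t : Bool),
    pvPick t (l ++ r) = pvPick t l ++ pvPick (if l.length % 2 = 0 then t else !t) r := by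
  induction l with
  | nil => intro t; simp [pvPick]
  | cons s ss ih =>
    intro t
    simp only [List.cons_append, pvPick, ih, List.length_cons, List.append_assoc]
    congr 2
    rcases Nat.even_or_odd ss.length with h | h
    · have h0 : ss.length % 2 = 0 := Nat.even_iff.mp h
      have h1 : (ss.length + 1) % 2 = 1 := by omega
      simp [h0, h1]
    · have h0 : ss.length % 2 = 1 := Nat.odd_iff.mp h
      have h1 : (ss.length + 1) % 2 = 0 := by omega
      simp [h0, h1]

theorem pvPick_snoc (l : List (List String)) (x : List String) (t : Bool) :
    pvPick t (l ++ [x]) = pvPick t l ++ (if (if l.length % 2 = 0 then t else !t) then x else []) := by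
  rw [pvPick_append l [x]]
  cases h : (if l.length % 2 = 0 then t else !t) <;> simp [pvPick]

-- the heart: A's toggle fold over the lines, started in the state denoted by B's phase-1 fold
-- state (closed, cur), lands in the state denoted by B's final segment list
theorem pvInv (lines : List String) : ∀ (closed : List (List String)) (cur : List String),
    lines.foldl pvAStep
        (pvPick false (closed ++ [cur]), pvPick true (closed ++ [cur]), decide (closed.length % 2 = 1))
      = (pvPick false ((lines.foldl pvSegStep (closed, cur)).1 ++ [(lines.foldl pvSegStep (closed, cur)).2]),
         pvPick true ((lines.foldl pvSegStep (closed, cur)).1 ++ [(lines.foldl pvSegStep (closed, cur)).2]),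
         decide ((lines.foldl pvSegStep (closed, cur)).1.length % 2 = 1)) := by
  induction lines with
  | nil => intro closed cur; rfl
  | cons line ls ih =>
    intro closed cur
    rcases Nat.even_or_odd closed.length with hpar | hpar
    · have h0 : closed.length % 2 = 0 := Nat.even_iff.mp hpar
      have h1 : (closed.length + 1) % 2 = 1 := by omega
      by_cases hf : pvIsFence line = true
      · have hA : pvAStep (pvPick false (closed ++ [cur]), pvPick true (closed ++ [cur]),
            decide (closed.length % 2 = 1)) line
              = (pvPick false ((closed ++ [cur]) ++ [[]]), pvPick true ((closed ++ [cur]) ++ [[]]),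
                 decide ((closed ++ [cur]).length % 2 = 1)) := by
          simp [pvAStep, hf, pvPick_append, pvPick, h0, h1]
        have hS : pvSegStep (closed, cur) line = (closed ++ [cur], ([] : List String)) := by
          simp [pvSegStep, hf]
        simp only [List.foldl, hA, hS]
        exact ih (closed ++ [cur]) []
      · have hA : pvAStep (pvPick false (closed ++ [cur]), pvPick true (closed ++ [cur]),
            decide (closed.length % 2 = 1)) line
              = (pvPick false (closed ++ [cur ++ [line]]), pvPick true (closed ++ [cur ++ [line]]),
                 decide (closed.length % 2 = 1)) := by
          simp [pvAStep, hf, pvPick_snoc, h0]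
        have hS : pvSegStep (closed, cur) line = (closed, cur ++ [line]) := by
          simp [pvSegStep, hf]
        simp only [List.foldl, hA, hS]
        exact ih closed (cur ++ [line])
    · have h0 : closed.length % 2 = 1 := Nat.odd_iff.mp hpar
      have h1 : (closed.length + 1) % 2 = 0 := by omega
      by_cases hf : pvIsFence line = true
      · have hA : pvAStep (pvPick false (closed ++ [cur]), pvPick true (closed ++ [cur]),
            decide (closed.length % 2 = 1)) line
              = (pvPick false ((closed ++ [cur]) ++ [[]]), pvPick true ((closed ++ [cur]) ++ [[]]),
                 decide ((closed ++ [cur]).length % 2 = 1)) := by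
          simp [pvAStep, hf, pvPick_append, pvPick, h0, h1]
        have hS : pvSegStep (closed, cur) line = (closed ++ [cur], ([] : List String)) := by
          simp [pvSegStep, hf]
        simp only [List.foldl, hA, hS]
        exact ih (closed ++ [cur]) []
      · have hA : pvAStep (pvPick false (closed ++ [cur]), pvPick true (closed ++ [cur]),
            decide (closed.length % 2 = 1)) line
              = (pvPick false (closed ++ [cur ++ [line]]), pvPick true (closed ++ [cur ++ [line]]),
                 decide (closed.length % 2 = 1)) := by
          simp [pvAStep, hf, pvPick_snoc, h0]
        have hS : pvSegStep (closed, cur) line = (closed, cur ++ [line]) := by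
          simp [pvSegStep, hf]
        simp only [List.foldl, hA, hS]
        exact ih closed (cur ++ [line])

-- ===== VERDICT (by name: the statement is the Claim_ definition above) =====
theorem split_code_and_explanation_py_spec : Claim_equal_split_code_and_explanation_py := by
  intro response _
  unfold Spec_split_code_and_explanation_py split_code_and_explanation_py split_code_and_explanation_py_alt
  simp only [pvSegments, pvAlternate]
  have hinv := pvInv (PySem.Str.splitlines response) [] []
  simp only [List.nil_append, pvPick, List.length_nil, Nat.zero_mod, if_true,
    List.append_nil] at hinv
  norm_num at hinv
  have halt := pvAlt_fold
      (((PySem.Str.splitlines response).foldl pvSegStep ([], [])).1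
        ++ [((PySem.Str.splitlines response).foldl pvSegStep ([], [])).2]) [] [] true
  simp only [List.nil_append, Bool.not_true] at halt
  have h1 := congrArg Prod.fst halt
  have h2 := congrArg (fun q => q.2) halt
  simp only at h1 h2
  rw [hinv]
  simp only [h1, h2]
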